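-- pv_equiv track=rewrite | github.com/motianyi/CCC-Assignment2 | data_analysis/calculators.py | neg_zero_pos_counter
-- ===== SOURCE A (Python) =====
-- def neg_zero_pos_counter(ls):
--     neg_count, zero_count, pos_count = 0, 0, 0
--     for i in ls:
--         if i > 0:
--             pos_count += 1
--         elif i == 0:
--             zero_count += 1
--         elif i < 0:
--             neg_count += 1
--     return neg_count, zero_count, pos_count
-- ===== SOURCE B (Python) =====
-- def neg_zero_pos_counter(ls):
--     neg = sum(1 for x in ls if x < 0)
--     zero = sum(1 for x in ls if x == 0)
--     pos = sum(1 for x in ls if x > 0)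
--     return neg, zero, pos
-- ===== Notes on version B (the rewrite author's own statement) =====
-- stated objective: simpler
-- what changed: Replaces the single stateful branching loop with three independent filtered-count passes, one per sign class.
import Mathlib
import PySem

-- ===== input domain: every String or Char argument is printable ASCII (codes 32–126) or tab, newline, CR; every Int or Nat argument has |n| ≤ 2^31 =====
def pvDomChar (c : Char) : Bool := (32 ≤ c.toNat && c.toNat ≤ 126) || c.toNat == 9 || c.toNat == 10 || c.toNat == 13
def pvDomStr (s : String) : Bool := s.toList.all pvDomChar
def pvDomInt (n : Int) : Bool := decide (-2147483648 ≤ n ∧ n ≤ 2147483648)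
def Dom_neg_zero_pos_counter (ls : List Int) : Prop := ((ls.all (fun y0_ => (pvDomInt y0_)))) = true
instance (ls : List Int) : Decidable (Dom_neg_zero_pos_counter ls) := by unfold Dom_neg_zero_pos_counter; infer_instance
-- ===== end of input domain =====

-- B replaces A's single stateful branching loop by three independent filtered counts (simpler decomposition, same cost).


-- ===== PORT A =====
def neg_zero_pos_counter (ls : List Int) : Int × Int × Int :=
  ls.foldl (fun (st : Int × Int × Int) (i : Int) =>
    let (neg_count, zero_count, pos_count) := st
    if i > 0 then (neg_count, zero_count, pos_count + 1)
    else if i == 0 then (neg_count, zero_count + 1, pos_count)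
    else if i < 0 then (neg_count + 1, zero_count, pos_count)
    else (neg_count, zero_count, pos_count)) ((0, 0, 0) : Int × Int × Int)

-- ===== PORT B =====
def neg_zero_pos_counter_alt (ls : List Int) : Int × Int × Int :=
  (((ls.filter (fun x => x < 0)).length : Int),
   ((ls.filter (fun x => x == 0)).length : Int),
   ((ls.filter (fun x => x > 0)).length : Int))

-- ===== PRECONDITION & SPEC =====
def Spec_neg_zero_pos_counter (ls : List Int) (out : Int × Int × Int) : Prop := out = neg_zero_pos_counter_alt ls
instance (ls : List Int) (out : Int × Int × Int) : Decidable (Spec_neg_zero_pos_counter ls out) := by unfold Spec_neg_zero_pos_counter; infer_instance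

-- ===== CLAIM (what is proved, stated in full; the proofs are below) =====
def Claim_equal_neg_zero_pos_counter : Prop := ∀ (ls : List Int), Dom_neg_zero_pos_counter ls → Spec_neg_zero_pos_counter ls (neg_zero_pos_counter ls)

-- ===== LEMMAS AND PROOFS =====

-- ===== VERDICT (by name: the statement is the Claim_ definition above) =====
def pvStep (st : Int × Int × Int) (i : Int) : Int × Int × Int :=
  if i > 0 then (st.1, st.2.1, st.2.2 + 1)
  else if i == 0 then (st.1, st.2.1 + 1, st.2.2)
  else if i < 0 then (st.1 + 1, st.2.1, st.2.2)
  else st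

lemma portA_foldl (ls : List Int) (st : Int × Int × Int) :
    ls.foldl (fun (st : Int × Int × Int) (i : Int) =>
      let (neg_count, zero_count, pos_count) := st
      if i > 0 then (neg_count, zero_count, pos_count + 1)
      else if i == 0 then (neg_count, zero_count + 1, pos_count)
      else if i < 0 then (neg_count + 1, zero_count, pos_count)
      else (neg_count, zero_count, pos_count)) st
      = ls.foldl pvStep st := by
  induction ls generalizing st with
  | nil => rfl
  | cons a t ih => simp only [List.foldl_cons, ih]; rfl

lemma counter_loop (ls : List Int) (n z p : Int) :
    ls.foldl pvStep (n, z, p)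
      = (n + ((ls.filter (fun x => x < 0)).length : Int),
         z + ((ls.filter (fun x => x == 0)).length : Int),
         p + ((ls.filter (fun x => x > 0)).length : Int)) := by
  induction ls generalizing n z p with
  | nil => simp
  | cons a t ih =>
    rw [List.foldl_cons]
    by_cases h1 : a > 0
    · have h2 : ¬ a < 0 := by omega
      have h3 : ¬ a = 0 := by omega
      have step : pvStep (n, z, p) a = (n, z, p + 1) := by simp [pvStep, h1]
      rw [step, ih]
      simp [List.filter_cons, h1, h2, h3, Prod.ext_iff]
      ring
    · by_cases h3 : a = 0
      · have h2 : ¬ a < 0 := by omega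
        have step : pvStep (n, z, p) a = (n, z + 1, p) := by simp [pvStep, h1, h3]
        rw [step, ih]
        simp [List.filter_cons, h1, h2, h3, Prod.ext_iff]
        ring
      · have h2 : a < 0 := by omega
        have step : pvStep (n, z, p) a = (n + 1, z, p) := by simp [pvStep, h1, h2, h3]
        rw [step, ih]
        simp [List.filter_cons, h1, h2, h3, Prod.ext_iff]
        ring

theorem neg_zero_pos_counter_spec : Claim_equal_neg_zero_pos_counter := by
  intro ls _
  unfold Spec_neg_zero_pos_counter neg_zero_pos_counter neg_zero_pos_counter_alt
  rw [portA_foldl, counter_loop]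
  simp
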